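-- pv_equiv track=rewrite | github.com/georgehgfonseca/dsa-python | kickstart/2022/practice3/2-wiggleWalk.py | wiggleWalk
-- ===== SOURCE A (Python) =====
-- def wiggleWalk(arr, s):
--     # TLE on TestSet 2
--     R, C, sR, sC = arr[1], arr[2], arr[3] - 1, arr[4] - 1
--     visited = {}
--     visited[(sR, sC)] = True
--     currR = sR
--     currC = sC
--     for i in range(len(s)):
--         if s[i] == "N":
--             while (currR, currC) in visited:
--                 currR -= 1
--         elif s[i] == "S":
--             while (currR, currC) in visited:
--                 currR += 1
--         elif s[i] == "W":
--             while (currR, currC) in visited: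
--                 currC -= 1
--         elif s[i] == "E":
--             while (currR, currC) in visited:
--                 currC += 1
--         visited[(currR, currC)] = True
--     return str(currR + 1) + " " + str(currC + 1)
-- ===== SOURCE B (Python) =====
-- def wiggleWalk(arr, s):
--     # Union-find-style skip pointers: every visited cell keeps, for each of the four
--     # directions, a pointer to a candidate next-free cell; a move chases pointers
--     # (jumping over whole visited runs) and path-compresses them afterwards.
--     cur = (arr[3] - 1, arr[4] - 1)
--     ptr = {}  # visited cell -> [candidate cell W, E, N, S]
--
--     def mark(cell):
--         r, c = cell
--         ptr[cell] = [(r, c - 1), (r, c + 1), (r - 1, c), (r + 1, c)]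
--
--     def chase(cell, d):
--         path = []
--         while cell in ptr:
--             path.append(cell)
--             cell = ptr[cell][d]
--         for p in path:
--             ptr[p][d] = cell
--         return cell
--
--     mark(cur)
--     for ch in s:
--         if ch == "W":
--             d = 0
--         elif ch == "E":
--             d = 1
--         elif ch == "N":
--             d = 2
--         elif ch == "S":
--             d = 3
--         else:
--             continue
--         cur = chase(cur, d)
--         mark(cur)
--     return str(cur[0] + 1) + " " + str(cur[1] + 1)
-- ===== Notes on version B (the rewrite author's own statement) =====
-- stated objective: faster
-- what changed: Replaces A's cell-by-cell while-loop scans over visited runs with union-find-style skip pointers (per visited cell, per direction, a candidate next-free cell) chased with path compression, so each move jumps over whole visited runs.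
import Mathlib
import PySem

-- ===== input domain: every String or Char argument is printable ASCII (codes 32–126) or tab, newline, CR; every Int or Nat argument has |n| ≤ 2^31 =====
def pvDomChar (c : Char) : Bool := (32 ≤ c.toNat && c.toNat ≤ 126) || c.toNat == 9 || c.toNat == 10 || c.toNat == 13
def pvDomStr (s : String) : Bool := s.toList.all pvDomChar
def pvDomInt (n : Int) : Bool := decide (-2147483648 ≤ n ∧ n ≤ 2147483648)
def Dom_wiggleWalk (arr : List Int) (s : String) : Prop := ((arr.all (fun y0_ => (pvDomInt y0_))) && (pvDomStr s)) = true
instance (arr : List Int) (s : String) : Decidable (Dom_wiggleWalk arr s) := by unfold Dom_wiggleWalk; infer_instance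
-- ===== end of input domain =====

-- B replaces A's cell-by-cell while-loops with union-find-style skip pointers
-- (per visited cell, per direction, a candidate next-free cell, chased with path
-- compression): asymptotically faster on long revisited runs.

-- ===== PORT A =====
-- one while-loop of A: step by δ while the current cell is visited
def wwScan (vis : PySem.Dict (Int × Int) Bool) (δ : Int × Int) :
    Nat → Int × Int → Int × Int
  | 0, u => u
  | fuel+1, u => if vis.contains u then wwScan vis δ fuel (u.1 + δ.1, u.2 + δ.2) else u

-- body of A's for-loop (branch order as in the Python)
def wwBodyA (st : PySem.Dict (Int × Int) Bool × (Int × Int)) (ch : Char) :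
    PySem.Dict (Int × Int) Bool × (Int × Int) :=
  let vis := st.1
  let u := st.2
  let u' :=
    if ch = 'N' then wwScan vis (-1, 0) (vis.size + 1) u
    else if ch = 'S' then wwScan vis (1, 0) (vis.size + 1) u
    else if ch = 'W' then wwScan vis (0, -1) (vis.size + 1) u
    else if ch = 'E' then wwScan vis (0, 1) (vis.size + 1) u
    else u
  (vis.insert u' true, u')

def wiggleWalk (arr : List Int) (s : String) : String :=
  let _R := PySem.List.pyGetD arr 1 0
  let _C := PySem.List.pyGetD arr 2 0
  let sR := PySem.List.pyGetD arr 3 0 - 1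
  let sC := PySem.List.pyGetD arr 4 0 - 1
  let st := s.toList.foldl wwBodyA (PySem.Dict.empty.insert (sR, sC) true, (sR, sC))
  PySem.Int.toStr (st.2.1 + 1) ++ " " ++ PySem.Int.toStr (st.2.2 + 1)

-- ===== PORT B =====
-- value stored per visited cell: candidate next-free cells for W, E, N, S
def pvQuad : Type := (Int × Int) × (Int × Int) × (Int × Int) × (Int × Int)

def pvDirs (u : Int × Int) : pvQuad :=
  ((u.1, u.2 - 1), (u.1, u.2 + 1), (u.1 - 1, u.2), (u.1 + 1, u.2))

def pvSel (q : pvQuad) : Nat → Int × Int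
  | 0 => q.1
  | 1 => q.2.1
  | 2 => q.2.2.1
  | _ => q.2.2.2

def pvSet (q : pvQuad) (v : Int × Int) : Nat → pvQuad
  | 0 => (v, q.2)
  | 1 => (q.1, v, q.2.2)
  | 2 => (q.1, q.2.1, v, q.2.2.2)
  | _ => (q.1, q.2.1, q.2.2.1, v)

def pvQ0 : pvQuad := ((0, 0), (0, 0), (0, 0), (0, 0))

-- the while-loop of chase: follow d-pointers, collecting the path
def wwChaseGo (p : PySem.Dict (Int × Int) pvQuad) (d : Nat) :
    Nat → Int × Int → List (Int × Int) → (Int × Int) × List (Int × Int)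
  | 0, cell, path => (cell, path)
  | fuel+1, cell, path =>
    match p.get? cell with
    | some q => wwChaseGo p d fuel (pvSel q d) (path ++ [cell])
    | none => (cell, path)

-- chase then path-compress: every path cell's d-pointer is set to the found free cell
def wwChase (p : PySem.Dict (Int × Int) pvQuad) (cell : Int × Int) (d : Nat) :
    (Int × Int) × PySem.Dict (Int × Int) pvQuad :=
  let fp := wwChaseGo p d (p.size + 1) cell []
  (fp.1, fp.2.foldl (fun acc x => acc.modify x pvQ0 (fun q => pvSet q fp.1 d)) p)

-- body of B's for-loop
def wwBodyB (st : PySem.Dict (Int × Int) pvQuad × (Int × Int)) (ch : Char) :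
    PySem.Dict (Int × Int) pvQuad × (Int × Int) :=
  let d? : Option Nat :=
    if ch = 'W' then some 0
    else if ch = 'E' then some 1
    else if ch = 'N' then some 2
    else if ch = 'S' then some 3
    else none
  match d? with
  | none => st
  | some d =>
    let fp := wwChase st.1 st.2 d
    (fp.2.insert fp.1 (pvDirs fp.1), fp.1)

def wiggleWalk_alt (arr : List Int) (s : String) : String :=
  let cur : Int × Int := (PySem.List.pyGetD arr 3 0 - 1, PySem.List.pyGetD arr 4 0 - 1)
  let st := s.toList.foldl wwBodyB (PySem.Dict.empty.insert cur (pvDirs cur), cur)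
  PySem.Int.toStr (st.2.1 + 1) ++ " " ++ PySem.Int.toStr (st.2.2 + 1)

-- ===== PRECONDITION & SPEC =====
-- Pre_ excludes exactly the inputs where the Python raises IndexError: both A and B
-- read arr[4] (A also arr[1..3]), so both raise iff len(arr) < 5.
def Pre_wiggleWalk (arr : List Int) (s : String) : Prop := 5 ≤ arr.length
instance (arr : List Int) (s : String) : Decidable (Pre_wiggleWalk arr s) := by
  unfold Pre_wiggleWalk; infer_instance

def pvWitness_wiggleWalk : List Int × String := ([1, 3, 3, 2, 2], "NESWNX S")

def Spec_wiggleWalk (arr : List Int) (s : String) (out : String) : Prop := out = wiggleWalk_alt arr s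
instance (arr : List Int) (s : String) (out : String) : Decidable (Spec_wiggleWalk arr s out) := by unfold Spec_wiggleWalk; infer_instance

-- ===== CLAIM (what is proved, stated in full; the proofs are below) =====
def Claim_equal_wiggleWalk : Prop := ∀ (arr : List Int) (s : String), Dom_wiggleWalk arr s → Pre_wiggleWalk arr s → Spec_wiggleWalk arr s (wiggleWalk arr s)

-- ===== LEMMAS AND PROOFS =====

def dvec : Nat → Int × Int
  | 0 => (0, -1)
  | 1 => (0, 1)
  | 2 => (-1, 0)
  | _ => (1, 0)

def cellAt (u δ : Int × Int) (j : Nat) : Int × Int := (u.1 + j * δ.1, u.2 + j * δ.2)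

def isDir (δ : Int × Int) : Prop := δ = (0, -1) ∨ δ = (0, 1) ∨ δ = (-1, 0) ∨ δ = (1, 0)

def onRay (u δ k : Int × Int) : Bool :=
  ((k.1 - u.1) * δ.2 == (k.2 - u.2) * δ.1) &&
  decide (0 ≤ (k.1 - u.1) * δ.1 + (k.2 - u.2) * δ.2)

lemma dvec_isDir (d : Nat) : isDir (dvec d) := by
  unfold isDir
  match d with
  | 0 => simp [dvec]
  | 1 => simp [dvec]
  | 2 => simp [dvec]
  | (n+3) => simp [dvec]

lemma cellAt_zero (u δ : Int × Int) : cellAt u δ 0 = u := by simp [cellAt]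

lemma cellAt_one (u δ : Int × Int) : cellAt u δ 1 = (u.1 + δ.1, u.2 + δ.2) := by simp [cellAt]

lemma cellAt_cellAt (u δ : Int × Int) (a b : Nat) :
    cellAt (cellAt u δ a) δ b = cellAt u δ (a + b) := by
  simp only [cellAt, Prod.mk.injEq]
  constructor <;> push_cast <;> ring

lemma onRay_cellAt (u δ : Int × Int) (h : isDir δ) (j : Nat) :
    onRay u δ (cellAt u δ j) = true := by
  rcases h with h | h | h | h <;> subst h <;>
    simp [onRay, cellAt]

lemma onRay_of_onRay_shift (u δ k : Int × Int) (h : isDir δ) (m : Nat)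
    (hk : onRay (cellAt u δ m) δ k = true) : onRay u δ k = true := by
  rcases h with h | h | h | h <;> subst h <;>
    simp [onRay, cellAt] at hk ⊢ <;> omega

lemma not_onRay_self (u δ : Int × Int) (h : isDir δ) (m : Nat) (hm : 1 ≤ m) :
    onRay (cellAt u δ m) δ u = false := by
  rcases h with h | h | h | h <;> subst h <;>
    simp [onRay, cellAt] <;> omega

def rayCard {ν : Type} (p : PySem.Dict (Int × Int) ν) (u δ : Int × Int) : Nat :=
  (p.keys.toFinset.filter (fun k => onRay u δ k = true)).card

lemma rayCard_lt {ν : Type} (p : PySem.Dict (Int × Int) ν) (u δ : Int × Int)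
    (h : isDir δ) (hu : p.contains u = true) (m : Nat) (hm : 1 ≤ m) :
    rayCard p (cellAt u δ m) δ < rayCard p u δ := by
  apply Finset.card_lt_card
  constructor
  · intro k hk
    simp only [Finset.mem_filter] at hk ⊢
    exact ⟨hk.1, onRay_of_onRay_shift u δ k h m hk.2⟩
  · intro hsub
    have humem : u ∈ p.keys.toFinset.filter (fun k => onRay u δ k = true) := by
      simp only [Finset.mem_filter]
      refine ⟨List.mem_toFinset.mpr ((PySem.Dict.contains_iff_mem_keys p u).mp hu), ?_⟩
      have := onRay_cellAt u δ h 0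
      rwa [cellAt_zero] at this
    have := hsub humem
    simp only [Finset.mem_filter] at this
    rw [not_onRay_self u δ h m hm] at this
    exact absurd this.2 (by simp)

lemma rayCard_le_size {ν : Type} (p : PySem.Dict (Int × Int) ν) (u δ : Int × Int) :
    rayCard p u δ ≤ p.size := by
  calc rayCard p u δ ≤ p.keys.toFinset.card := Finset.card_filter_le _ _
    _ ≤ p.keys.length := p.keys.toFinset_card_le
    _ = p.size := by simp [PySem.Dict.keys, PySem.Dict.size]

def firstFree (cont : Int × Int → Bool) (u δ f : Int × Int) : Prop :=
  ∃ m : Nat, f = cellAt u δ m ∧ cont f = false ∧ ∀ j, j < m → cont (cellAt u δ j) = true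

lemma firstFree_unique (cont : Int × Int → Bool) (u δ f1 f2 : Int × Int)
    (h1 : firstFree cont u δ f1) (h2 : firstFree cont u δ f2) : f1 = f2 := by
  obtain ⟨m1, he1, hf1, ha1⟩ := h1
  obtain ⟨m2, he2, hf2, ha2⟩ := h2
  rcases lt_trichotomy m1 m2 with hlt | heq | hlt
  · exact absurd (he1 ▸ ha2 m1 hlt) (by simp [hf1])
  · rw [he1, he2, heq]
  · exact absurd (he2 ▸ ha1 m2 hlt) (by simp [hf2])

lemma firstFree_congr (c1 c2 : Int × Int → Bool) (hc : ∀ k, c1 k = c2 k)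
    (u δ f : Int × Int) (h : firstFree c1 u δ f) : firstFree c2 u δ f := by
  obtain ⟨m, he, hf, ha⟩ := h
  exact ⟨m, he, hc f ▸ hf, fun j hj => hc _ ▸ ha j hj⟩

lemma wwScan_spec (vis : PySem.Dict (Int × Int) Bool) (δ : Int × Int) (h : isDir δ) :
    ∀ (fuel : Nat) (u : Int × Int), rayCard vis u δ < fuel →
      firstFree vis.contains u δ (wwScan vis δ fuel u) := by
  intro fuel
  induction fuel with
  | zero => intro u hu; omega
  | succ n ih =>
    intro u hu
    by_cases hc : vis.contains u = true
    · have hstep : (u.1 + δ.1, u.2 + δ.2) = cellAt u δ 1 := (cellAt_one u δ).symm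
      have hlt : rayCard vis (cellAt u δ 1) δ < n := by
        have := rayCard_lt vis u δ h hc 1 le_rfl
        omega
      have hrec := ih (cellAt u δ 1) hlt
      obtain ⟨m, he, hf, ha⟩ := hrec
      rw [cellAt_cellAt] at he
      refine ⟨1 + m, ?_, ?_, ?_⟩
      · simpa [wwScan, hc, hstep] using he
      · simpa [wwScan, hc, hstep] using hf
      · intro j hj
        match j with
        | 0 => rw [cellAt_zero]; exact hc
        | j'+1 =>
          have := ha j' (by omega)
          rw [cellAt_cellAt] at this
          rw [(by omega : j' + 1 = 1 + j')]
          exact this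
    · refine ⟨0, ?_, ?_, ?_⟩
      · simp [wwScan, hc, cellAt_zero]
      · simp [wwScan, hc]
      · intro j hj; omega

def PInv (p : PySem.Dict (Int × Int) pvQuad) : Prop :=
  ∀ u, p.contains u = true → ∀ d, d < 4 →
    ∃ m : Nat, 1 ≤ m ∧ pvSel (p.getD u pvQ0) d = cellAt u (dvec d) m ∧
      ∀ j, 1 ≤ j → j < m → p.contains (cellAt u (dvec d) j) = true

lemma pvSel_pvSet (q : pvQuad) (v : Int × Int) (d d' : Nat) (hd : d < 4) (hd' : d' < 4) :
    pvSel (pvSet q v d) d' = if d' = d then v else pvSel q d' := by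
  interval_cases d <;> interval_cases d' <;> simp [pvSel, pvSet]

lemma pvSel_pvDirs (u : Int × Int) (d : Nat) (hd : d < 4) :
    pvSel (pvDirs u) d = cellAt u (dvec d) 1 := by
  interval_cases d <;> simp [pvSel, pvDirs, dvec, cellAt] <;> ring

lemma getD_of_contains {κ ν : Type} [BEq κ] (d : PySem.Dict κ ν) (k : κ) (d0 : ν)
    (h : d.contains k = true) : d.get? k = some (d.getD k d0) := by
  rw [PySem.Dict.contains_eq_isSome_get?] at h
  rw [PySem.Dict.getD_eq_get?_getD]
  cases hg : d.get? k with
  | none => rw [hg] at h; simp at h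
  | some v => simp

lemma wwChaseGo_spec (p : PySem.Dict (Int × Int) pvQuad) (d : Nat) (hd : d < 4)
    (hinv : PInv p) :
    ∀ (fuel : Nat) (u : Int × Int) (path : List (Int × Int)),
      rayCard p u (dvec d) < fuel →
      firstFree p.contains u (dvec d) (wwChaseGo p d fuel u path).1 ∧
      ∀ x ∈ (wwChaseGo p d fuel u path).2,
        x ∈ path ∨ (p.contains x = true ∧
          firstFree p.contains x (dvec d) (wwChaseGo p d fuel u path).1) := by
  have hdir := dvec_isDir d
  intro fuel
  induction fuel with
  | zero => intro u path hu; omega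
  | succ n ih =>
    intro u path hu
    cases hg : p.get? u with
    | none =>
      have hcu : p.contains u = false := by
        rw [PySem.Dict.contains_eq_isSome_get?, hg]; rfl
      constructor
      · exact ⟨0, by simp [wwChaseGo, hg, cellAt_zero], by simp [wwChaseGo, hg, hcu],
          fun j hj => by omega⟩
      · intro x hx
        simp only [wwChaseGo, hg] at hx
        exact Or.inl hx
    | some q =>
      have hcu : p.contains u = true := by
        rw [PySem.Dict.contains_eq_isSome_get?, hg]; rfl
      have hq : p.getD u pvQ0 = q := by
        have := getD_of_contains p u pvQ0 hcu
        rw [hg] at this; exact (Option.some_inj.mp this).symm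
      obtain ⟨m, hm1, hmsel, hmint⟩ := hinv u hcu d hd
      rw [hq] at hmsel
      have hlt : rayCard p (cellAt u (dvec d) m) (dvec d) < n := by
        have := rayCard_lt p u (dvec d) hdir hcu m hm1
        omega
      have hrec := ih (cellAt u (dvec d) m) (path ++ [u]) hlt
      have hunf : wwChaseGo p d (n+1) u path
          = wwChaseGo p d n (cellAt u (dvec d) m) (path ++ [u]) := by
        simp [wwChaseGo, hg, hmsel]
      rw [hunf]
      obtain ⟨⟨mf, hfe, hff, hfa⟩, hpath⟩ := hrec
      have hffu : firstFree p.contains u (dvec d)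
          (wwChaseGo p d n (cellAt u (dvec d) m) (path ++ [u])).1 := by
        refine ⟨m + mf, ?_, hff, ?_⟩
        · rw [hfe, cellAt_cellAt]
        · intro j hj
          by_cases hjm : j < m
          · match j, hjm with
            | 0, _ => rw [cellAt_zero]; exact hcu
            | j'+1, hjm => exact hmint (j'+1) (by omega) hjm
          · have : j = m + (j - m) := by omega
            rw [this, ← cellAt_cellAt]
            exact hfa (j - m) (by omega)
      refine ⟨hffu, ?_⟩
      intro x hx
      rcases hpath x hx with hin | hok
      · rcases List.mem_append.mp hin with h' | h'
        · exact Or.inl h'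
        · have : x = u := by simpa using h'
          subst this
          exact Or.inr ⟨hcu, hffu⟩
      · exact Or.inr hok

lemma compress_spec (d : Nat) (hd : d < 4) (f : Int × Int) :
    ∀ (path : List (Int × Int)) (p : PySem.Dict (Int × Int) pvQuad), PInv p →
      (∀ x ∈ path, p.contains x = true ∧ firstFree p.contains x (dvec d) f) →
      (∀ k, (path.foldl (fun acc x => acc.modify x pvQ0 (fun q => pvSet q f d)) p).contains k
            = p.contains k) ∧
      PInv (path.foldl (fun acc x => acc.modify x pvQ0 (fun q => pvSet q f d)) p) := by
  intro path
  induction path with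
  | nil => intro p hinv _; exact ⟨fun k => rfl, hinv⟩
  | cons x path ih =>
    intro p hinv hall
    obtain ⟨hxc, hxf⟩ := hall x (List.mem_cons_self)
    set p1 := p.modify x pvQ0 (fun q => pvSet q f d) with hp1
    have hcont : ∀ k, p1.contains k = p.contains k := by
      intro k
      rw [hp1, PySem.Dict.contains_modify]
      by_cases hk : k = x
      · subst hk; simp [hxc]
      · simp [hk]
    have hinv1 : PInv p1 := by
      intro u hu d' hd'
      rw [hcont] at hu
      have hgd : p1.getD u pvQ0 =
          if u = x then pvSet (p.getD x pvQ0) f d else p.getD u pvQ0 :=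
        PySem.Dict.getD_modify p x u pvQ0 (fun q => pvSet q f d)
      by_cases hux : u = x
      · subst hux
        rw [hgd, if_pos rfl]
        by_cases hdd : d' = d
        · subst hdd
          rw [pvSel_pvSet _ _ _ _ hd' hd', if_pos rfl]
          obtain ⟨mf, hfe, hff, hfa⟩ := hxf
          have hm1 : 1 ≤ mf := by
            rcases Nat.eq_zero_or_pos mf with h0 | h1
            · subst h0; rw [cellAt_zero] at hfe; rw [hfe] at hff
              rw [hxc] at hff; exact absurd hff (by simp)
            · exact h1
          exact ⟨mf, hm1, hfe, fun j h1 h2 => by rw [hcont]; exact hfa j h2⟩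
        · rw [pvSel_pvSet _ _ _ _ hd hd', if_neg hdd]
          obtain ⟨m, hm1, hmsel, hmint⟩ := hinv u hu d' hd'
          exact ⟨m, hm1, hmsel, fun j h1 h2 => by rw [hcont]; exact hmint j h1 h2⟩
      · rw [hgd, if_neg hux]
        obtain ⟨m, hm1, hmsel, hmint⟩ := hinv u hu d' hd'
        exact ⟨m, hm1, hmsel, fun j h1 h2 => by rw [hcont]; exact hmint j h1 h2⟩
    have hall1 : ∀ y ∈ path, p1.contains y = true ∧ firstFree p1.contains y (dvec d) f := by
      intro y hy
      obtain ⟨hyc, hyf⟩ := hall y (List.mem_cons_of_mem _ hy)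
      exact ⟨(hcont y).trans hyc,
        firstFree_congr p.contains p1.contains (fun k => (hcont k).symm) _ _ _ hyf⟩
    obtain ⟨hc2, hi2⟩ := ih p1 hinv1 hall1
    refine ⟨fun k => (hc2 k).trans (hcont k), hi2⟩

lemma PInv_insert (p : PySem.Dict (Int × Int) pvQuad) (hinv : PInv p) (f : Int × Int) :
    PInv (p.insert f (pvDirs f)) := by
  intro u hu d hd
  rw [PySem.Dict.contains_insert] at hu
  have hgd : (p.insert f (pvDirs f)).getD u pvQ0 =
      if u = f then pvDirs f else p.getD u pvQ0 := PySem.Dict.getD_insert p f u (pvDirs f) pvQ0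
  by_cases huf : u = f
  · subst huf
    rw [hgd, if_pos rfl, pvSel_pvDirs u d hd]
    exact ⟨1, le_rfl, rfl, fun j h1 h2 => by omega⟩
  · have hu' : p.contains u = true := by simpa [huf] using hu
    obtain ⟨m, hm1, hmsel, hmint⟩ := hinv u hu' d hd
    rw [hgd, if_neg huf]
    refine ⟨m, hm1, hmsel, fun j h1 h2 => ?_⟩
    rw [PySem.Dict.contains_insert]
    simp [hmint j h1 h2]

def RelSt (vis : PySem.Dict (Int × Int) Bool) (p : PySem.Dict (Int × Int) pvQuad)
    (cur : Int × Int) : Prop :=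
  (∀ k, vis.contains k = p.contains k) ∧ PInv p ∧ p.contains cur = true

lemma wwChase_eq (vis : PySem.Dict (Int × Int) Bool) (p : PySem.Dict (Int × Int) pvQuad)
    (cur : Int × Int) (d : Nat) (hd : d < 4)
    (hrel : ∀ k, vis.contains k = p.contains k) (hinv : PInv p) :
    (wwChase p cur d).1 = wwScan vis (dvec d) (vis.size + 1) cur ∧
    (∀ k, (wwChase p cur d).2.contains k = p.contains k) ∧
    PInv (wwChase p cur d).2 := by
  have hdir := dvec_isDir d
  have hA := wwScan_spec vis (dvec d) hdir (vis.size + 1) cur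
    (Nat.lt_succ_of_le (rayCard_le_size vis cur (dvec d)))
  have hB := wwChaseGo_spec p d hd hinv (p.size + 1) cur []
    (Nat.lt_succ_of_le (rayCard_le_size p cur (dvec d)))
  obtain ⟨hBf, hBpath⟩ := hB
  have hAf : firstFree p.contains cur (dvec d) (wwScan vis (dvec d) (vis.size + 1) cur) :=
    firstFree_congr vis.contains p.contains hrel _ _ _ hA
  have heq : (wwChaseGo p d (p.size + 1) cur []).1 = wwScan vis (dvec d) (vis.size + 1) cur :=
    firstFree_unique p.contains cur (dvec d) _ _ hBf hAf
  have hpath : ∀ x ∈ (wwChaseGo p d (p.size + 1) cur []).2,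
      p.contains x = true ∧ firstFree p.contains x (dvec d) (wwChaseGo p d (p.size + 1) cur []).1 := by
    intro x hx
    rcases hBpath x hx with h | h
    · exact absurd h (List.not_mem_nil)
    · exact h
  obtain ⟨hc, hi⟩ := compress_spec d hd (wwChaseGo p d (p.size + 1) cur []).1
    (wwChaseGo p d (p.size + 1) cur []).2 p hinv hpath
  exact ⟨heq, hc, hi⟩

lemma wwBody_eq (vis : PySem.Dict (Int × Int) Bool) (p : PySem.Dict (Int × Int) pvQuad)
    (cur : Int × Int) (ch : Char) (hrel : RelSt vis p cur) :
    (wwBodyA (vis, cur) ch).2 = (wwBodyB (p, cur) ch).2 ∧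
    RelSt (wwBodyA (vis, cur) ch).1 (wwBodyB (p, cur) ch).1 (wwBodyA (vis, cur) ch).2 := by
  obtain ⟨hc, hinv, hcur⟩ := hrel
  have hmove : ∀ d : Nat, d < 4 →
      (wwChase p cur d).1 = wwScan vis (dvec d) (vis.size + 1) cur ∧
      RelSt (vis.insert (wwScan vis (dvec d) (vis.size + 1) cur) true)
        ((wwChase p cur d).2.insert (wwChase p cur d).1 (pvDirs (wwChase p cur d).1))
        (wwScan vis (dvec d) (vis.size + 1) cur) := by
    intro d hd
    obtain ⟨heq, hcomp, hicomp⟩ := wwChase_eq vis p cur d hd hc hinv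
    refine ⟨heq, ?_, ?_, ?_⟩
    · intro k
      rw [PySem.Dict.contains_insert, PySem.Dict.contains_insert, heq, hcomp, hc]
    · exact PInv_insert _ hicomp _
    · rw [heq, PySem.Dict.contains_insert]
      simp
  by_cases h1 : ch = 'N'
  · subst h1
    have h := hmove 2 (by omega)
    simp only [wwBodyA, wwBodyB]
    norm_num
    have h2 : dvec 2 = (-1, 0) := rfl
    rw [h2] at h
    exact ⟨h.1.symm, h.2⟩
  by_cases h2 : ch = 'S'
  · subst h2
    have h := hmove 3 (by omega)
    simp only [wwBodyA, wwBodyB]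
    norm_num
    have h2 : dvec 3 = (1, 0) := rfl
    rw [h2] at h
    exact ⟨h.1.symm, h.2⟩
  by_cases h3 : ch = 'W'
  · subst h3
    have h := hmove 0 (by omega)
    simp only [wwBodyA, wwBodyB]
    norm_num
    have h2 : dvec 0 = (0, -1) := rfl
    rw [h2] at h
    exact ⟨h.1.symm, h.2⟩
  by_cases h4 : ch = 'E'
  · subst h4
    have h := hmove 1 (by omega)
    simp only [wwBodyA, wwBodyB]
    norm_num
    have h2 : dvec 1 = (0, 1) := rfl
    rw [h2] at h
    exact ⟨h.1.symm, h.2⟩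
  · simp only [wwBodyA, wwBodyB, if_neg h1, if_neg h2, if_neg h3, if_neg h4]
    refine ⟨trivial, ?_, hinv, hcur⟩
    intro k
    rw [PySem.Dict.contains_insert]
    by_cases hk : k = cur
    · subst hk; simp [hc, hcur]
    · simp [hk, hc]

lemma fold_eq : ∀ (l : List Char) (vis : PySem.Dict (Int × Int) Bool)
    (p : PySem.Dict (Int × Int) pvQuad) (cur : Int × Int), RelSt vis p cur →
    (l.foldl wwBodyA (vis, cur)).2 = (l.foldl wwBodyB (p, cur)).2 ∧
    RelSt (l.foldl wwBodyA (vis, cur)).1 (l.foldl wwBodyB (p, cur)).1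
      (l.foldl wwBodyA (vis, cur)).2 := by
  intro l
  induction l with
  | nil => intro vis p cur h; exact ⟨rfl, h⟩
  | cons ch l ih =>
    intro vis p cur h
    obtain ⟨heq, hrel⟩ := wwBody_eq vis p cur ch h
    have ha : wwBodyA (vis, cur) ch = ((wwBodyA (vis, cur) ch).1, (wwBodyA (vis, cur) ch).2) := rfl
    have hb : wwBodyB (p, cur) ch = ((wwBodyB (p, cur) ch).1, (wwBodyB (p, cur) ch).2) := rfl
    have := ih (wwBodyA (vis, cur) ch).1 (wwBodyB (p, cur) ch).1 (wwBodyA (vis, cur) ch).2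
      hrel
    simp only [List.foldl_cons]
    rw [ha, hb, ← heq]
    exact this

lemma relSt_init (u : Int × Int) :
    RelSt (PySem.Dict.empty.insert u true) (PySem.Dict.empty.insert u (pvDirs u)) u := by
  refine ⟨?_, ?_, ?_⟩
  · intro k
    rw [PySem.Dict.contains_insert, PySem.Dict.contains_insert,
      PySem.Dict.contains_empty, PySem.Dict.contains_empty]
  · apply PInv_insert
    intro v hv
    rw [PySem.Dict.contains_empty] at hv
    exact absurd hv (by simp)
  · rw [PySem.Dict.contains_insert]; simp

lemma ww_equiv : ∀ (arr : List Int) (s : String),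
    wiggleWalk arr s = wiggleWalk_alt arr s := by
  intro arr s
  simp only [wiggleWalk, wiggleWalk_alt]
  have h := fold_eq s.toList
    (PySem.Dict.empty.insert (PySem.List.pyGetD arr 3 0 - 1, PySem.List.pyGetD arr 4 0 - 1) true)
    (PySem.Dict.empty.insert (PySem.List.pyGetD arr 3 0 - 1, PySem.List.pyGetD arr 4 0 - 1)
      (pvDirs (PySem.List.pyGetD arr 3 0 - 1, PySem.List.pyGetD arr 4 0 - 1)))
    (PySem.List.pyGetD arr 3 0 - 1, PySem.List.pyGetD arr 4 0 - 1)
    (relSt_init _)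
  rw [h.1]

-- ===== VERDICT (by name: the statement is the Claim_ definition above) =====
theorem wiggleWalk_spec : Claim_equal_wiggleWalk := by
  intro arr s _ _
  unfold Spec_wiggleWalk
  exact ww_equiv arr s
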